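-- pv_equiv track=rewrite | github.com/emc255/python-algorithm-design | questions/hard/number_of_flowers_in_full_bloom.py | full_bloom_flowers_v2
-- ===== SOURCE A (Python) =====
-- from collections import defaultdict
--
-- def full_bloom_flowers_v2(flowers: list, people: list) -> list:
--     blooming = defaultdict(int)  # use line sweep
--     for start, end in flowers:
--         blooming[start] += 1
--         blooming[end + 1] -= 1
--
--     result = {}
--     bloom_count = 0
--     people_time = sorted(people, reverse=True)  # sort persons desc so we can pop from last index
--
--     for time in sorted(blooming.keys()):  # loop over sorted status updates
--         bloom_change = blooming[time]
--
--         while people_time and time > people_time[-1]:  # if current time is greater than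
--             result[people_time.pop()] = bloom_count  # current person answer is last bloom_cnt
--
--         if not people_time: break
--
--         bloom_count += bloom_change
--
--     return [result[p] if p in result else 0 for p in people]
-- ===== SOURCE B (Python) =====
-- def _count_le(xs, t):
--     # number of elements of sorted list xs that are <= t (hand-rolled bisect_right)
--     lo, hi = 0, len(xs)
--     while lo < hi:
--         mid = (lo + hi) // 2
--         if xs[mid] <= t:
--             lo = mid + 1
--         else:
--             hi = mid
--     return lo
--
--
-- def _count_lt(xs, t):
--     # number of elements of sorted list xs that are < t (hand-rolled bisect_left)
--     lo, hi = 0, len(xs)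
--     while lo < hi:
--         mid = (lo + hi) // 2
--         if xs[mid] < t:
--             lo = mid + 1
--         else:
--             hi = mid
--     return lo
--
--
-- def full_bloom_flowers_v2(flowers: list, people: list) -> list:
--     starts = sorted(s for s, e in flowers)
--     ends = sorted(e for s, e in flowers)
--     return [_count_le(starts, t) - _count_lt(ends, t) for t in people]
-- ===== Notes on version B (the rewrite author's own statement) =====
-- stated objective: alternative
-- what changed: Replaces A's difference-map line sweep (defaultdict of deltas, sorted event times, a running bloom counter and popping people from a descending stack) by two sorted lists of start and end times and, per person, two hand-rolled binary searches: answer = count(starts <= t) - count(ends < t), computed directly in input order.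
import Mathlib
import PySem

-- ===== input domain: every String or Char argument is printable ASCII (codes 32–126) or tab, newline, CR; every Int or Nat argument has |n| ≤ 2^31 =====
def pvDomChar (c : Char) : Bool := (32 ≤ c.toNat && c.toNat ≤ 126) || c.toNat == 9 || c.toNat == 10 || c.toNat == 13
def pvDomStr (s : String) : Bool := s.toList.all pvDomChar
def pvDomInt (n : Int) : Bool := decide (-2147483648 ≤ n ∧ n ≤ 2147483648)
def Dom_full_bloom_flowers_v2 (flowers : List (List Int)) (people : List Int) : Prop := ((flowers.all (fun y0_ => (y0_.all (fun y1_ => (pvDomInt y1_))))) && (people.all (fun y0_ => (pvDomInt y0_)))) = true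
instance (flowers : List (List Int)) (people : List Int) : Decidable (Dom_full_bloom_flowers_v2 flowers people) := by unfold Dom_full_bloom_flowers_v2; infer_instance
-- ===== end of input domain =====

-- B replaces A's difference-map line sweep by two sorted lists of start/end times and two
-- binary searches per person (count(starts ≤ t) − count(ends < t)); alternative algorithm of similar cost.

-- ===== PORT A =====
-- while people_time and time > people_time[-1]: result[people_time.pop()] = bloom_count
def popLoopA (time cnt : Int) : Nat → List Int → PySem.Dict Int Int →
    List Int × PySem.Dict Int Int
  | 0, st, res => (st, res)  -- fuel only bounds the iteration count; never reached from st.length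
  | fuel + 1, st, res =>
      match st.getLast? with
      | some t =>
          if time > t then popLoopA time cnt fuel st.dropLast (res.insert t cnt)
          else (st, res)
      | none => (st, res)

-- for time in sorted(blooming.keys()): …  (break when people_time becomes empty)
def sweepLoopA (bl : PySem.Dict Int Int) : List Int → PySem.Dict Int Int → Int → List Int → PySem.Dict Int Int
  | [], res, _, _ => res
  | time :: ks, res, cnt, st =>
      let change := bl.getD time 0
      let pr := popLoopA time cnt st.length st res
      if pr.1.isEmpty then pr.2
      else sweepLoopA bl ks pr.2 (cnt + change) pr.1

def full_bloom_flowers_v2 (flowers : List (List Int)) (people : List Int) : List Int :=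
  let blooming := flowers.foldl (fun d row =>
      match row with
      | [start, stop] => (d.modify start 0 (· + 1)).modify (stop + 1) 0 (· - 1)
      | _ => d) PySem.Dict.empty
  let people_time := PySem.List.sorted people (fun x => x) true
  let res := sweepLoopA blooming (PySem.List.sorted blooming.keys (fun x => x) false)
      PySem.Dict.empty 0 people_time
  people.map (fun p => match res.get? p with | some v => v | none => 0)

-- ===== PORT B =====
-- number of elements of the sorted list xs that are ≤ t (hand-rolled bisect_right loop;
-- the fuel argument only bounds the iteration count of the while loop)
def countLEAux (xs : List Int) (t : Int) : Nat → Nat → Nat → Nat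
  | 0, lo, _ => lo
  | fuel + 1, lo, hi =>
      if lo < hi then
        let mid := (lo + hi) / 2
        if xs.getD mid 0 ≤ t then countLEAux xs t fuel (mid + 1) hi
        else countLEAux xs t fuel lo mid
      else lo

def countLE (xs : List Int) (t : Int) (lo hi : Nat) : Nat :=
  countLEAux xs t (hi - lo) lo hi

-- number of elements of the sorted list xs that are < t (hand-rolled bisect_left loop)
def countLTAux (xs : List Int) (t : Int) : Nat → Nat → Nat → Nat
  | 0, lo, _ => lo
  | fuel + 1, lo, hi =>
      if lo < hi then
        let mid := (lo + hi) / 2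
        if xs.getD mid 0 < t then countLTAux xs t fuel (mid + 1) hi
        else countLTAux xs t fuel lo mid
      else lo

def countLT (xs : List Int) (t : Int) (lo hi : Nat) : Nat :=
  countLTAux xs t (hi - lo) lo hi

def full_bloom_flowers_v2_alt (flowers : List (List Int)) (people : List Int) : List Int :=
  let starts := PySem.List.sorted (flowers.map (fun r => r.getD 0 0)) (fun x => x) false
  let ends := PySem.List.sorted (flowers.map (fun r => r.getD 1 0)) (fun x => x) false
  people.map (fun t => (countLE starts t 0 starts.length : Int) - (countLT ends t 0 ends.length : Int))

-- ===== PRECONDITION & SPEC =====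
-- Pre_ excludes flower rows whose length is not 2, on which A's `for start, end in flowers`
-- raises ValueError (B's generator unpacking raises there too).
def Pre_full_bloom_flowers_v2 (flowers : List (List Int)) (people : List Int) : Prop :=
  ∀ row ∈ flowers, row.length = 2
instance (flowers : List (List Int)) (people : List Int) : Decidable (Pre_full_bloom_flowers_v2 flowers people) := by
  unfold Pre_full_bloom_flowers_v2; infer_instance

def pvWitness_full_bloom_flowers_v2 : List (List Int) × List Int :=
  ([[1, 6], [3, 7], [9, 12], [4, 13]], [2, 3, 7, 11])

def Spec_full_bloom_flowers_v2 (flowers : List (List Int)) (people : List Int) (out : List Int) : Prop := out = full_bloom_flowers_v2_alt flowers people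
instance (flowers : List (List Int)) (people : List Int) (out : List Int) : Decidable (Spec_full_bloom_flowers_v2 flowers people out) := by unfold Spec_full_bloom_flowers_v2; infer_instance

-- ===== CLAIM (what is proved, stated in full; the proofs are below) =====
def Claim_equal_full_bloom_flowers_v2 : Prop := ∀ (flowers : List (List Int)) (people : List Int), Dom_full_bloom_flowers_v2 flowers people → Pre_full_bloom_flowers_v2 flowers people → Spec_full_bloom_flowers_v2 flowers people (full_bloom_flowers_v2 flowers people)

-- ===== LEMMAS AND PROOFS =====

-- start time, end time + 1, event times, and the sweep delta of a flower list
def rowS (r : List Int) : Int := r.getD 0 0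
def rowE1 (r : List Int) : Int := r.getD 1 0 + 1
def evts (fl : List (List Int)) : List Int := fl.flatMap (fun r => [rowS r, rowE1 r])
def dlt (fl : List (List Int)) (k : Int) : Int :=
  (fl.countP (fun r => rowS r == k) : Int) - (fl.countP (fun r => rowE1 r == k) : Int)

-- the dict-building fold step of A
def stepA (d : PySem.Dict Int Int) (row : List Int) : PySem.Dict Int Int :=
  match row with
  | [start, stop] => (d.modify start 0 (· + 1)).modify (stop + 1) 0 (· - 1)
  | _ => d

theorem build_getD : ∀ (fl : List (List Int)) (d : PySem.Dict Int Int) (k : Int),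
    (∀ row ∈ fl, row.length = 2) →
    (fl.foldl stepA d).getD k 0 = d.getD k 0 + dlt fl k := by
  intro fl
  induction fl with
  | nil => intro d k _; simp [dlt]
  | cons r fl ih =>
    intro d k h2
    obtain ⟨s, e, rfl⟩ : ∃ s e, r = [s, e] := by
      have hr := h2 r (by simp)
      match r, hr with | [s, e], _ => exact ⟨s, e, rfl⟩
    have h2' : ∀ row ∈ fl, row.length = 2 := fun row hrow => h2 row (by simp [hrow])
    rw [List.foldl_cons, ih _ k h2']
    simp only [stepA, dlt, List.countP_cons, PySem.Dict.getD_modify, rowS, rowE1,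
      List.getD_cons_zero, List.getD_cons_succ, beq_iff_eq]
    push_cast
    split_ifs <;> subst_vars <;> omega

theorem build_keys : ∀ (fl : List (List Int)) (d : PySem.Dict Int Int) (k : Int),
    (∀ row ∈ fl, row.length = 2) →
    (k ∈ (fl.foldl stepA d).keys ↔ k ∈ d.keys ∨ k ∈ evts fl) := by
  intro fl
  induction fl with
  | nil => intro d k _; simp [evts]
  | cons r fl ih =>
    intro d k h2
    obtain ⟨s, e, rfl⟩ : ∃ s e, r = [s, e] := by
      have hr := h2 r (by simp)
      match r, hr with | [s, e], _ => exact ⟨s, e, rfl⟩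
    have h2' : ∀ row ∈ fl, row.length = 2 := fun row hrow => h2 row (by simp [hrow])
    rw [List.foldl_cons, ih _ k h2']
    simp only [stepA, evts, List.flatMap_cons, rowS, rowE1, List.getD_cons_zero,
      List.getD_cons_succ, List.mem_append, List.mem_cons, List.not_mem_nil,
      ← PySem.Dict.contains_iff_mem_keys, PySem.Dict.contains_modify, Bool.or_eq_true,
      beq_iff_eq]
    tauto

theorem build_nodup : ∀ (fl : List (List Int)) (d : PySem.Dict Int Int),
    d.keys.Nodup → (fl.foldl stepA d).keys.Nodup := by
  intro fl
  induction fl with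
  | nil => intro d hd; simpa using hd
  | cons r fl ih =>
    intro d hd
    rw [List.foldl_cons]
    apply ih
    unfold stepA
    match r with
    | [s, e] =>
      have h1 : (d.modify s 0 (· + 1)).keys.Nodup := by
        rw [PySem.Dict.keys_modify]; exact PySem.Dict.nodup_keys_insert _ _ _ hd
      rw [PySem.Dict.keys_modify]
      exact PySem.Dict.nodup_keys_insert _ _ _ h1
    | [] => exact hd
    | [_] => exact hd
    | _ :: _ :: _ :: _ => exact hd

-- a partition point determines countP
theorem countP_of_partition : ∀ (xs : List Int) (q : Int → Bool) (r : Nat), r ≤ xs.length →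
    (∀ i (h : i < xs.length), i < r → q xs[i]) →
    (∀ i (h : i < xs.length), r ≤ i → ¬ q xs[i]) →
    xs.countP q = r := by
  intro xs
  induction xs with
  | nil =>
    intro q r hr _ _
    simp only [List.countP_nil]
    simp only [List.length_nil] at hr
    omega
  | cons x xs ih =>
    intro q r hr h1 h2
    match r with
    | 0 =>
      rw [List.countP_eq_zero]
      intro a ha
      obtain ⟨i, hi, rfl⟩ := List.mem_iff_getElem.mp ha
      exact h2 i hi (Nat.zero_le i)
    | r + 1 =>
      have hq : q x := by simpa using h1 0 (by simp) (Nat.succ_pos r)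
      rw [List.countP_cons, ih q r (by simpa using hr)
        (fun i h hi => by simpa using h1 (i + 1) (by simpa using h) (by omega))
        (fun i h hi => by simpa using h2 (i + 1) (by simpa using h) (by omega))]
      simp [hq]

theorem countLEAux_inv (xs : List Int) (t : Int) (hs : xs.Pairwise (· ≤ ·)) :
    ∀ (fuel lo hi : Nat), hi - lo ≤ fuel → lo ≤ hi → hi ≤ xs.length →
    (∀ i (h : i < xs.length), i < lo → xs[i] ≤ t) →
    (∀ i (h : i < xs.length), hi ≤ i → ¬ xs[i] ≤ t) →
    countLEAux xs t fuel lo hi = xs.countP (fun x => decide (x ≤ t)) := by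
  have hmono := List.pairwise_iff_getElem.mp hs
  intro fuel
  induction fuel with
  | zero =>
    intro lo hi hf hlo hhi h1 h2
    have : lo = hi := by omega
    subst this
    exact (countP_of_partition xs _ lo (by omega) (fun i h hi => by simpa using h1 i h hi)
      (fun i h hi => by simpa using h2 i h (by omega))).symm
  | succ fuel ih =>
    intro lo hi hf hlo hhi h1 h2
    rw [countLEAux]
    by_cases hlt : lo < hi
    · rw [if_pos hlt]
      simp only []
      set mid := (lo + hi) / 2 with hmid
      have hm : mid < xs.length := by omega
      by_cases hle : xs.getD mid 0 ≤ t
      · rw [if_pos hle]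
        have hxm : xs[mid] ≤ t := by rwa [List.getD_eq_getElem xs 0 hm] at hle
        exact ih (mid + 1) hi (by omega) (by omega) hhi
          (fun i h hi2 => by
            rcases Nat.lt_or_ge i mid with hc | hc
            · exact le_trans (hmono i mid h hm hc) hxm
            · have : i = mid := by omega
              subst this; exact hxm)
          h2
      · rw [if_neg hle]
        have hxm : ¬ xs[mid] ≤ t := by rwa [List.getD_eq_getElem xs 0 hm] at hle
        exact ih lo mid (by omega) (by omega) (by omega) h1
          (fun i h hi2 => by
            rcases Nat.lt_or_ge mid i with hc | hc
            · exact fun hit => hxm (le_trans (hmono mid i hm h hc) hit)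
            · have : i = mid := by omega
              subst this; exact hxm)
    · rw [if_neg hlt]
      have : lo = hi := by omega
      subst this
      exact (countP_of_partition xs _ lo (by omega) (fun i h hi => by simpa using h1 i h hi)
        (fun i h hi => by simpa using h2 i h (by omega))).symm

theorem countLE_spec (xs : List Int) (t : Int) (hs : xs.Pairwise (· ≤ ·)) :
    countLE xs t 0 xs.length = xs.countP (fun x => decide (x ≤ t)) := by
  exact countLEAux_inv xs t hs _ 0 xs.length (by omega) (Nat.zero_le _) (le_refl _)
    (fun i h hi => by omega) (fun i h hi => by omega)

theorem countLTAux_inv (xs : List Int) (t : Int) (hs : xs.Pairwise (· ≤ ·)) :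
    ∀ (fuel lo hi : Nat), hi - lo ≤ fuel → lo ≤ hi → hi ≤ xs.length →
    (∀ i (h : i < xs.length), i < lo → xs[i] < t) →
    (∀ i (h : i < xs.length), hi ≤ i → ¬ xs[i] < t) →
    countLTAux xs t fuel lo hi = xs.countP (fun x => decide (x < t)) := by
  have hmono := List.pairwise_iff_getElem.mp hs
  intro fuel
  induction fuel with
  | zero =>
    intro lo hi hf hlo hhi h1 h2
    have : lo = hi := by omega
    subst this
    exact (countP_of_partition xs _ lo (by omega) (fun i h hi => by simpa using h1 i h hi)
      (fun i h hi => by simpa using h2 i h (by omega))).symm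
  | succ fuel ih =>
    intro lo hi hf hlo hhi h1 h2
    rw [countLTAux]
    by_cases hlt : lo < hi
    · rw [if_pos hlt]
      simp only []
      set mid := (lo + hi) / 2 with hmid
      have hm : mid < xs.length := by omega
      by_cases hle : xs.getD mid 0 < t
      · rw [if_pos hle]
        have hxm : xs[mid] < t := by rwa [List.getD_eq_getElem xs 0 hm] at hle
        exact ih (mid + 1) hi (by omega) (by omega) hhi
          (fun i h hi2 => by
            rcases Nat.lt_or_ge i mid with hc | hc
            · exact lt_of_le_of_lt (hmono i mid h hm hc) hxm
            · have : i = mid := by omega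
              subst this; exact hxm)
          h2
      · rw [if_neg hle]
        have hxm : ¬ xs[mid] < t := by rwa [List.getD_eq_getElem xs 0 hm] at hle
        exact ih lo mid (by omega) (by omega) (by omega) h1
          (fun i h hi2 => by
            rcases Nat.lt_or_ge mid i with hc | hc
            · exact fun hit => hxm (lt_of_le_of_lt (hmono mid i hm h hc) hit)
            · have : i = mid := by omega
              subst this; exact hxm)
    · rw [if_neg hlt]
      have : lo = hi := by omega
      subst this
      exact (countP_of_partition xs _ lo (by omega) (fun i h hi => by simpa using h1 i h hi)
        (fun i h hi => by simpa using h2 i h (by omega))).symm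

theorem countLT_spec (xs : List Int) (t : Int) (hs : xs.Pairwise (· ≤ ·)) :
    countLT xs t 0 xs.length = xs.countP (fun x => decide (x < t)) := by
  exact countLTAux_inv xs t hs _ 0 xs.length (by omega) (Nat.zero_le _) (le_refl _)
    (fun i h hi => by omega) (fun i h hi => by omega)

-- Σ over a duplicate-free list of indicator ifs
theorem sum_ite_eq_mem : ∀ (l : List Int), l.Nodup → ∀ y : Int,
    (l.map (fun k => if y = k then (1 : Int) else 0)).sum = if y ∈ l then 1 else 0 := by
  intro l
  induction l with
  | nil => simp
  | cons k l ih =>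
    intro hnd y
    simp only [List.nodup_cons] at hnd
    simp only [List.map_cons, List.sum_cons, List.mem_cons, ih hnd.2 y]
    by_cases hy : y = k
    · subst hy; simp [hnd.1]
    · simp [hy]

-- Σ_{k ∈ ks'} count of k in ys = how many elements of ys lie in ks' (ks' without duplicates)
theorem sum_count_eq_countP (ks' : List Int) (hnd : ks'.Nodup) :
    ∀ (ys : List Int),
      ((ks'.map (fun k => (ys.count k : Int))).sum) = (ys.countP (fun y => decide (y ∈ ks')) : Int) := by
  intro ys
  induction ys with
  | nil => simp
  | cons y ys ih =>
    have hcong : ∀ k ∈ ks', ((List.count k (y :: ys) : Int)) =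
        (List.count k ys : Int) + (if y = k then (1 : Int) else 0) := by
      intro k _
      rw [List.count_cons]
      by_cases hy : y = k <;> simp [hy]
    rw [List.map_congr_left hcong, PySem.List.sum_map_add_int, ih, sum_ite_eq_mem ks' hnd y,
      List.countP_cons]
    by_cases hm : y ∈ ks' <;> simp [hm]

theorem popLoopA_concat (time cnt t : Int) (ys : List Int) (res : PySem.Dict Int Int) :
    popLoopA time cnt (ys ++ [t]).length (ys ++ [t]) res =
      if time > t then popLoopA time cnt ys.length ys (res.insert t cnt)
      else (ys ++ [t], res) := by
  have hlen : (ys ++ [t]).length = ys.length + 1 := by simp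
  rw [hlen, popLoopA, List.getLast?_concat]
  simp only [List.dropLast_concat]

theorem popLoop_spec (time cnt : Int) :
    ∀ (st : List Int) (res : PySem.Dict Int Int), st.Pairwise (fun a b => b ≤ a) →
      (popLoopA time cnt st.length st res).1 = st.filter (fun t => decide (time ≤ t)) ∧
      ∀ p, ((popLoopA time cnt st.length st res).2).get? p =
        if p ∈ st ∧ p < time then some cnt else res.get? p := by
  intro st
  induction st using List.reverseRecOn with
  | nil =>
    intro res _
    constructor
    · simp [popLoopA]
    · intro p; simp [popLoopA]
  | append_singleton ys t ih =>
    intro res hpw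
    have hpw' : ys.Pairwise (fun a b => b ≤ a) := (List.pairwise_append.mp hpw).1
    have hall : ∀ y ∈ ys, t ≤ y := fun y hy => (List.pairwise_append.mp hpw).2.2 y hy t (by simp)
    rw [popLoopA_concat]
    by_cases hc : time > t
    · simp only [if_pos hc]
      obtain ⟨h1, h2⟩ := ih (res.insert t cnt) hpw'
      refine ⟨?_, ?_⟩
      · rw [h1, List.filter_append]
        have : ¬ (time ≤ t) := by omega
        simp [this]
      · intro p
        rw [h2 p]
        by_cases hp : p = t
        · subst hp
          by_cases hm : p ∈ ys <;> simp [hm, hc, PySem.Dict.get?_insert_self]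
        · rw [PySem.Dict.get?_insert_of_ne _ _ hp]
          by_cases hm : p ∈ ys <;> simp [hm, hp]
    · simp only [if_neg hc]
      refine ⟨?_, ?_⟩
      · have : ∀ a ∈ ys ++ [t], (fun x => decide (time ≤ x)) a = true := by
          intro a ha
          simp only [List.mem_append, List.mem_cons, List.not_mem_nil, or_false] at ha
          rcases ha with ha | ha
          · have := hall a ha; simp; omega
          · subst ha; simp; omega
        exact (List.filter_eq_self.mpr this).symm
      · intro p
        have : ¬ (p ∈ ys ++ [t] ∧ p < time) := by
          rintro ⟨hm, hlt⟩
          simp only [List.mem_append, List.mem_singleton] at hm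
          rcases hm with hm | hm
          · have := hall p hm; omega
          · subst hm; omega
        rw [if_neg this]

theorem sweep_spec (bl : PySem.Dict Int Int) :
    ∀ (ks : List Int) (res : PySem.Dict Int Int) (cnt : Int) (st : List Int),
      ks.Pairwise (· < ·) → st.Pairwise (fun a b => b ≤ a) →
      ∀ p, (sweepLoopA bl ks res cnt st).get? p =
        if p ∈ st ∧ ∃ k ∈ ks, p < k
        then some (cnt + ((ks.filter (fun k => decide (k ≤ p))).map (fun k => bl.getD k 0)).sum)
        else res.get? p := by
  intro ks
  induction ks with
  | nil =>
    intro res cnt st _ _ p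
    simp [sweepLoopA]
  | cons time ks ih =>
    intro res cnt st hks hst p
    have hksall : ∀ k ∈ ks, time < k := fun k hk => (List.pairwise_cons.mp hks).1 k hk
    have hks' : ks.Pairwise (· < ·) := (List.pairwise_cons.mp hks).2
    obtain ⟨hfil, hres⟩ := popLoop_spec time cnt st res hst
    simp only [sweepLoopA]
    by_cases hemp : (popLoopA time cnt st.length st res).1.isEmpty
    · rw [if_pos hemp, hres p]
      have hnone : ∀ q ∈ st, q < time := by
        intro q hq
        have : (st.filter (fun t => decide (time ≤ t))) = [] := by
          rw [← hfil]; exact List.isEmpty_iff.mp hemp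
        by_contra hq2
        have : q ∈ st.filter (fun t => decide (time ≤ t)) := by
          rw [List.mem_filter]; exact ⟨hq, by simp; omega⟩
        simp_all
      by_cases hm : p ∈ st
      · have hplt : p < time := hnone p hm
        have hcond : p ∈ st ∧ ∃ k ∈ time :: ks, p < k := ⟨hm, time, by simp, hplt⟩
        rw [if_pos ⟨hm, hplt⟩, if_pos hcond]
        have hfilnil : (time :: ks).filter (fun k => decide (k ≤ p)) = [] := by
          rw [List.filter_eq_nil_iff]
          intro k hk
          simp only [List.mem_cons] at hk
          rcases hk with hk | hk
          · subst hk; simp; omega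
          · have := hksall k hk; simp; omega
        rw [hfilnil]; simp
      · have h1 : ¬ (p ∈ st ∧ p < time) := fun h => hm h.1
        have h2 : ¬ (p ∈ st ∧ ∃ k ∈ time :: ks, p < k) := fun h => hm h.1
        rw [if_neg h1, if_neg h2]
    · rw [if_neg hemp]
      have hst' : (popLoopA time cnt st.length st res).1.Pairwise (fun a b => b ≤ a) := by
        rw [hfil]; exact List.Pairwise.filter _ hst
      rw [ih _ _ _ hks' hst' p, hres p]
      have hmem' : p ∈ (popLoopA time cnt st.length st res).1 ↔ (p ∈ st ∧ time ≤ p) := by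
        rw [hfil, List.mem_filter]; simp
      by_cases hm : p ∈ st
      · by_cases hplt : p < time
        · -- popped: value cnt, and the head filter contributes nothing
          have hnm' : ¬ (p ∈ (popLoopA time cnt st.length st res).1 ∧ ∃ k ∈ ks, p < k) := by
            rintro ⟨hp1, _⟩; rw [hmem'] at hp1; omega
          rw [if_neg hnm', if_pos ⟨hm, hplt⟩]
          have hcond : p ∈ st ∧ ∃ k ∈ time :: ks, p < k := ⟨hm, time, by simp, hplt⟩
          rw [if_pos hcond]
          have hfilnil : (time :: ks).filter (fun k => decide (k ≤ p)) = [] := by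
            rw [List.filter_eq_nil_iff]
            intro k hk
            simp only [List.mem_cons] at hk
            rcases hk with hk | hk
            · subst hk; simp; omega
            · have := hksall k hk; simp; omega
          rw [hfilnil]; simp
        · have hge : time ≤ p := by omega
          have hmem2 : p ∈ (popLoopA time cnt st.length st res).1 := hmem'.mpr ⟨hm, hge⟩
          have hnp : ¬ (p ∈ st ∧ p < time) := fun h => hplt h.2
          have hfilcons : (time :: ks).filter (fun k => decide (k ≤ p)) =
              time :: ks.filter (fun k => decide (k ≤ p)) := by
            simp only [List.filter_cons]
            have : decide (time ≤ p) = true := by simp; omega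
            simp [this]
          by_cases hex : ∃ k ∈ ks, p < k
          · rw [if_pos ⟨hmem2, hex⟩]
            have hcond : p ∈ st ∧ ∃ k ∈ time :: ks, p < k := by
              obtain ⟨k, hk, hpk⟩ := hex
              exact ⟨hm, k, by simp [hk], hpk⟩
            rw [if_pos hcond, hfilcons]
            simp only [List.map_cons, List.sum_cons]
            ring_nf
          · have hn1 : ¬ (p ∈ (popLoopA time cnt st.length st res).1 ∧ ∃ k ∈ ks, p < k) :=
              fun h => hex h.2
            have hn2 : ¬ (p ∈ st ∧ ∃ k ∈ time :: ks, p < k) := by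
              rintro ⟨_, k, hk, hpk⟩
              simp only [List.mem_cons] at hk
              rcases hk with hk | hk
              · subst hk; omega
              · exact hex ⟨k, hk, hpk⟩
            rw [if_neg hn1, if_neg hn2, if_neg hnp]
      · have hn1 : ¬ (p ∈ (popLoopA time cnt st.length st res).1 ∧ ∃ k ∈ ks, p < k) := by
          rintro ⟨hp1, _⟩; rw [hmem'] at hp1; exact hm hp1.1
        have hn2 : ¬ (p ∈ st ∧ ∃ k ∈ time :: ks, p < k) := fun h => hm h.1
        have hn3 : ¬ (p ∈ st ∧ p < time) := fun h => hm h.1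
        rw [if_neg hn1, if_neg hn2, if_neg hn3]

theorem sum_map_sub_int (xs : List Int) (f g : Int → Int) :
    (xs.map (fun x => f x - g x)).sum = (xs.map f).sum - (xs.map g).sum := by
  induction xs with
  | nil => simp
  | cons x xs ih => simp only [List.map_cons, List.sum_cons, ih]; ring

-- the end time of a flower row
def rowE (r : List Int) : Int := r.getD 1 0

-- ===== VERDICT (by name: the statement is the Claim_ definition above) =====
theorem full_bloom_flowers_v2_spec : Claim_equal_full_bloom_flowers_v2 := by
  intro flowers people _dom hpre
  unfold Spec_full_bloom_flowers_v2
  unfold Pre_full_bloom_flowers_v2 at hpre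
  simp only [full_bloom_flowers_v2, full_bloom_flowers_v2_alt]
  -- name the A-side objects
  rw [show (fun (d : PySem.Dict Int Int) (row : List Int) => match row with
      | [start, stop] => (d.modify start 0 (· + 1)).modify (stop + 1) 0 (· - 1)
      | _ => d) = stepA from rfl]
  set bl := flowers.foldl stepA PySem.Dict.empty with hbl
  set ks := PySem.List.sorted bl.keys (fun x => x) false with hks
  set st := PySem.List.sorted people (fun x => x) true with hst
  -- B-side: the mapped projections are rowS / rowE by definition
  rw [show (fun (r : List Int) => r.getD 0 0) = rowS from rfl,
      show (fun (r : List Int) => r.getD 1 0) = rowE from rfl]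
  -- facts about bl and ks
  have hknd : bl.keys.Nodup := build_nodup flowers PySem.Dict.empty (by simp [PySem.Dict.keys_empty])
  have hkmem : ∀ k : Int, k ∈ bl.keys ↔ k ∈ evts flowers := by
    intro k
    rw [hbl, build_keys flowers PySem.Dict.empty k hpre]
    simp [PySem.Dict.keys_empty]
  have hgetD : ∀ k : Int, bl.getD k 0 = dlt flowers k := by
    intro k
    rw [hbl, build_getD flowers PySem.Dict.empty k hpre]
    simp [PySem.Dict.getD_empty]
  have hksnd : ks.Nodup := ((PySem.List.sorted_perm bl.keys (fun x => x) false).nodup_iff).mpr hknd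
  have hksle : ks.Pairwise (fun a b => a ≤ b) := PySem.List.sorted_pairwise bl.keys (fun x => x)
  have hkslt : ks.Pairwise (· < ·) := by
    have := hksle.and hksnd
    exact this.imp (fun h => lt_of_le_of_ne h.1 h.2)
  have hksmem : ∀ k : Int, k ∈ ks ↔ k ∈ evts flowers := by
    intro k
    rw [hks, PySem.List.mem_sorted]
    exact hkmem k
  have hstpw : st.Pairwise (fun a b => b ≤ a) := PySem.List.sorted_pairwise_rev people (fun x => x)
  -- pointwise equality of the two mapped functions
  apply List.map_congr_left
  intro p hp
  have hpst : p ∈ st := by rw [hst, PySem.List.mem_sorted]; exact hp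
  rw [sweep_spec bl ks PySem.Dict.empty 0 st hkslt hstpw p]
  -- B's two binary searches are countP over the flower projections
  have hSpw : (PySem.List.sorted (flowers.map rowS) (fun x => x) false).Pairwise (· ≤ ·) :=
    PySem.List.sorted_pairwise _ _
  have hEpw : (PySem.List.sorted (flowers.map rowE) (fun x => x) false).Pairwise (· ≤ ·) :=
    PySem.List.sorted_pairwise _ _
  rw [countLE_spec _ p hSpw, countLT_spec _ p hEpw,
    List.Perm.countP_eq _ (PySem.List.sorted_perm (flowers.map rowS) (fun x => x) false),
    List.Perm.countP_eq _ (PySem.List.sorted_perm (flowers.map rowE) (fun x => x) false),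
    List.countP_map, List.countP_map]
  -- events of each kind are in ks
  have hSin : ∀ r ∈ flowers, rowS r ∈ ks := by
    intro r hr
    rw [hksmem]
    unfold evts
    exact List.mem_flatMap.mpr ⟨r, hr, by simp⟩
  have hEin : ∀ r ∈ flowers, rowE1 r ∈ ks := by
    intro r hr
    rw [hksmem]
    unfold evts
    exact List.mem_flatMap.mpr ⟨r, hr, by simp⟩
  have hE1 : ∀ r : List Int, rowE1 r = rowE r + 1 := by intro r; rfl
  by_cases hex : ∃ k ∈ ks, p < k
  · rw [if_pos ⟨hpst, hex⟩]
    -- compute the sum over filtered keys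
    have hfun : (fun k => bl.getD k 0) = dlt flowers := funext hgetD
    rw [hfun]
    set ks' := ks.filter (fun k => decide (k ≤ p)) with hks'
    have hks'nd : ks'.Nodup := hksnd.filter _
    have hks'mem : ∀ y : Int, y ∈ ks' ↔ (y ∈ ks ∧ y ≤ p) := by
      intro y; rw [hks', List.mem_filter]; simp
    unfold dlt
    rw [show (fun k => ((flowers.countP (fun r => rowS r == k) : Int)
          - (flowers.countP (fun r => rowE1 r == k) : Int)))
        = (fun k => ((flowers.map rowS).count k : Int) - ((flowers.map rowE1).count k : Int)) from ?_]
    · rw [sum_map_sub_int, sum_count_eq_countP ks' hks'nd, sum_count_eq_countP ks' hks'nd]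
      have hcs : (flowers.map rowS).countP (fun y => decide (y ∈ ks'))
          = (flowers.map rowS).countP (fun y => decide (y ≤ p)) := by
        apply List.countP_congr
        intro y hy
        obtain ⟨r, hr, rfl⟩ := List.mem_map.mp hy
        simp only [decide_eq_true_eq]
        rw [hks'mem]
        exact ⟨fun h => h.2, fun h => ⟨hSin r hr, h⟩⟩
      have hce : (flowers.map rowE1).countP (fun y => decide (y ∈ ks'))
          = (flowers.map rowE1).countP (fun y => decide (y ≤ p)) := by
        apply List.countP_congr
        intro y hy
        obtain ⟨r, hr, rfl⟩ := List.mem_map.mp hy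
        simp only [decide_eq_true_eq]
        rw [hks'mem]
        exact ⟨fun h => h.2, fun h => ⟨hEin r hr, h⟩⟩
      rw [hcs, hce, List.countP_map, List.countP_map]
      have hee : flowers.countP ((fun y => decide (y ≤ p)) ∘ rowE1)
          = flowers.countP ((fun y => decide (y < p)) ∘ rowE) := by
        apply List.countP_congr
        intro r _
        simp only [Function.comp_apply, decide_eq_true_eq, hE1]
        omega
      rw [hee]
      ring
    · funext k
      rw [List.count_eq_countP, List.count_eq_countP, List.countP_map, List.countP_map]
      rfl
  · rw [if_neg (fun h => hex h.2)]
    -- all keys are ≤ p: both counts are the full length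
    have hall : ∀ k ∈ ks, k ≤ p := by
      intro k hk
      by_contra hc
      exact hex ⟨k, hk, by omega⟩
    have hcs : flowers.countP ((fun y => decide (y ≤ p)) ∘ rowS) = flowers.length := by
      rw [show flowers.length = (flowers.map rowS).length by simp, ← List.countP_map]
      apply List.countP_eq_length.mpr
      intro y hy
      obtain ⟨r, hr, rfl⟩ := List.mem_map.mp hy
      simp only [decide_eq_true_eq]
      exact hall _ (hSin r hr)
    have hce : flowers.countP ((fun y => decide (y < p)) ∘ rowE) = flowers.length := by
      have : flowers.countP ((fun y => decide (y < p)) ∘ rowE)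
          = flowers.countP ((fun y => decide (y ≤ p)) ∘ rowE1) := by
        apply List.countP_congr
        intro r _
        simp only [Function.comp_apply, decide_eq_true_eq, hE1]
        omega
      rw [this, show flowers.length = (flowers.map rowE1).length by simp, ← List.countP_map]
      apply List.countP_eq_length.mpr
      intro y hy
      obtain ⟨r, hr, rfl⟩ := List.mem_map.mp hy
      simp only [decide_eq_true_eq]
      exact hall _ (hEin r hr)
    rw [hcs, hce, PySem.Dict.get?_empty]
    simp
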